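-- pv_equiv track=rewrite | github.com/facebookincubator/cinderx | cinderx/benchmarks/immortal_decref.py | bench_str_compare
-- ===== SOURCE A (Python) =====
-- def bench_str_compare(n: int) -> int:
--     count = 0
--     keys = ["alpha", "beta", "gamma", "delta", "epsilon"]
--     target = "gamma"
--     for i in range(n):
--         if keys[i % 5] == target:
--             count += 1
--     return count
-- ===== SOURCE B (Python) =====
-- def bench_str_compare(n: int) -> int:
--     # closed form: number of i in [0, n) with i % 5 == 2
--     return max(0, (n + 2) // 5)
-- ===== Notes on version B (the rewrite author's own statement) =====
-- stated objective: faster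
-- what changed: replaced the O(n) loop that compares keys[i % 5] to 'gamma' with the closed-form count max(0, (n+2)//5) of indices i in [0,n) with i % 5 == 2
import Mathlib
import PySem

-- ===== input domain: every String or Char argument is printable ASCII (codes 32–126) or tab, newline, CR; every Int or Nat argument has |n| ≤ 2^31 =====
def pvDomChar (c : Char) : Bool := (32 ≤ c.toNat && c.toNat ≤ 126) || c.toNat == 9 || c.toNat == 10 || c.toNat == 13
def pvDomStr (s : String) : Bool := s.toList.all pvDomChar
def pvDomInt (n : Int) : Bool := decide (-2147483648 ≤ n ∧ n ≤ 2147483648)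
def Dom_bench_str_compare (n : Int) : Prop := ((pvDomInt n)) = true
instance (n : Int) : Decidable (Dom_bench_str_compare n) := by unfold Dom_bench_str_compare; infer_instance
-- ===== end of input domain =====

-- B replaces A's O(n) loop by the closed form max(0, (n+2)//5); objective: faster (asymptotic).

-- ===== PORT A =====
def bench_str_compare (n : Int) : Int :=
  let count : Int := 0
  let keys : List String := ["alpha", "beta", "gamma", "delta", "epsilon"]
  let target : String := "gamma"
  (PySem.List.pyRange 0 n 1).foldl
    (fun count i =>
      if PySem.List.pyGet? keys (PySem.Int.mod i 5) = some target then count + 1 else count)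
    count

-- ===== PORT B =====
def bench_str_compare_alt (n : Int) : Int :=
  max 0 (PySem.Int.floordiv (n + 2) 5)

-- ===== PRECONDITION & SPEC =====
def Spec_bench_str_compare (n : Int) (out : Int) : Prop := out = bench_str_compare_alt n
instance (n : Int) (out : Int) : Decidable (Spec_bench_str_compare n out) := by unfold Spec_bench_str_compare; infer_instance

-- ===== CLAIM (what is proved, stated in full; the proofs are below) =====
def Claim_equal_bench_str_compare : Prop := ∀ (n : Int), Dom_bench_str_compare n → Spec_bench_str_compare n (bench_str_compare n)

-- ===== LEMMAS AND PROOFS =====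

-- A on a natural number argument computes the closed-form count.
theorem bench_A_nat (m : Nat) : bench_str_compare (m : Int) = (((m + 2) / 5 : Nat) : Int) := by
  induction m with
  | zero => decide
  | succ k ih =>
      unfold bench_str_compare at ih ⊢
      rw [show ((k + 1 : Nat) : Int) = (k : Int) + 1 by push_cast; ring,
          PySem.List.pyRange_one_succ_right (by positivity), List.foldl_append]
      simp only [List.foldl]
      rw [ih, show PySem.Int.mod (k : Int) 5 = ((k % 5 : Nat) : Int) from PySem.Int.mod_natCast k 5]
      have h5 : k % 5 = 0 ∨ k % 5 = 1 ∨ k % 5 = 2 ∨ k % 5 = 3 ∨ k % 5 = 4 := by omega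
      rcases h5 with h | h | h | h | h <;> rw [h] <;>
        [rw [if_neg (by decide)]; rw [if_neg (by decide)]; rw [if_pos (by decide)];
         rw [if_neg (by decide)]; rw [if_neg (by decide)]] <;>
        · norm_cast
          omega

theorem bench_alt_eq (n : Int) : bench_str_compare n = bench_str_compare_alt n := by
  by_cases h : n ≤ 0
  · have hr : PySem.List.pyRange 0 n 1 = [] := PySem.List.pyRange_one_eq_nil (by omega)
    have hA : bench_str_compare n = 0 := by unfold bench_str_compare; rw [hr]; rfl
    have hlt : PySem.Int.floordiv (n + 2) 5 < 1 :=
      (PySem.Int.floordiv_lt_iff_lt_mul (by omega)).mpr (by omega)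
    unfold bench_str_compare_alt
    omega
  · have h : 0 < n := by omega
    obtain ⟨m, rfl⟩ : ∃ m : Nat, n = (m : Int) := ⟨n.toNat, by omega⟩
    rw [bench_A_nat m]
    unfold bench_str_compare_alt
    rw [show (m : Int) + 2 = ((m + 2 : Nat) : Int) by push_cast; ring,
        show (5 : Int) = ((5 : Nat) : Int) by norm_num,
        PySem.Int.floordiv_natCast]
    omega

-- ===== VERDICT (by name: the statement is the Claim_ definition above) =====
theorem bench_str_compare_spec : Claim_equal_bench_str_compare := by
  intro n _
  exact bench_alt_eq n
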